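-- pv_equiv track=rewrite | github.com/Mo-Morris/doc2web | scripts/doc2web.py | top_sections
-- ===== SOURCE A (Python) =====
-- def sections_with_text(sections: list[dict[str, str]]) -> list[dict[str, str]]:
--     usable = [section for section in sections if section["text"].strip()]
--     return usable or sections[:]
--
-- def top_sections(sections: list[dict[str, str]], count: int = 6) -> list[dict[str, str]]:
--     usable = sections_with_text(sections)
--     ranked = sorted(usable, key=lambda item: len(item["text"]), reverse=True)
--     selected: list[dict[str, str]] = []
--     seen: set[str] = set()
--     for section in ranked:
--         key = section["anchor"]
--         if key not in seen:
--             selected.append(section)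
--             seen.add(key)
--         if len(selected) >= count:
--             break
--     return selected
-- ===== SOURCE B (Python) =====
-- def sections_with_text(sections):
--     usable = [section for section in sections if section["text"].strip()]
--     return usable or sections[:]
--
-- def top_sections(sections, count=6):
--     usable = sections_with_text(sections)
--     best = {}
--     for idx, section in enumerate(usable):
--         key = section["anchor"]
--         size = len(section["text"])
--         cur = best.get(key)
--         best[key] = (size, idx, section) if cur is None or size > cur[0] else cur
--     reps = sorted(best.values(), key=lambda item: (-item[0], item[1]))
--     return [section for pos, (_size, _idx, section) in enumerate(reps) if pos < count]
-- ===== Notes on version B (the rewrite author's own statement) =====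
-- stated objective: alternative
-- what changed: B replaces A's sort-everything-then-dedup-while-walking with a single dict pass that keeps one best (longest-text, earliest) representative per anchor and then sorts only the distinct representatives by (-length, original index), truncating by position.
-- intended difference: On count <= 0 with a nonempty section list A still returns one section (its break fires only after the first append); B returns the empty selection, the intended meaning of asking for at most count sections. — e.g. on top_sections([[("text", "a"), ("anchor", "x")]], 0): A returns [[("text", "a"), ("anchor", "x")]], B returns []
import Mathlib
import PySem

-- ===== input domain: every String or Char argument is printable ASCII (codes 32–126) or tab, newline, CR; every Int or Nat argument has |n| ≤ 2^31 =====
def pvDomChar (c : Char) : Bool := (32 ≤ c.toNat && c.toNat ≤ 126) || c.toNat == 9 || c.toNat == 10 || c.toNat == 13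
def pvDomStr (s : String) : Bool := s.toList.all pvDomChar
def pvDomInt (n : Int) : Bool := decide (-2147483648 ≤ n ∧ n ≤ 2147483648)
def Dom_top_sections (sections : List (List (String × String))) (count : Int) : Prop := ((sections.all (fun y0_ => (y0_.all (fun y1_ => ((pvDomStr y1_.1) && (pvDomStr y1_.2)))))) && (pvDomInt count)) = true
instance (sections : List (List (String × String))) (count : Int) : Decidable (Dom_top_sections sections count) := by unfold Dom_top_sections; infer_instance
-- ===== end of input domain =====

-- B groups sections by anchor in one dict pass (keeping the longest-text representative per
-- anchor) and then sorts only the distinct representatives, instead of sorting the whole list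
-- and deduplicating during a descending walk; equal on every input with count ≥ 1 (see D_ below).

-- dict lookup d[k] as the total getD: faithful on Pre_ (the key is present)
def pvGetD (sec : List (String × String)) (key : String) : String :=
  (PySem.Dict.mk sec).getD key ""

def pvLen (sec : List (String × String)) : Int := PySem.Str.len (pvGetD sec "text")

def pvAnch (sec : List (String × String)) : String := pvGetD sec "anchor"

-- shared module helper (used verbatim by both A and B, as in the Python module)
def sections_with_text (sections : List (List (String × String))) : List (List (String × String)) :=
  let usable := sections.filter (fun sec => !(PySem.Str.strip (pvGetD sec "text") == ""))
  if usable = [] then sections else usable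

-- ===== PORT A =====
-- the for-loop over ranked with its two `break` checks, transcribed as recursion on the list
def topLoop (count : Int) : List (List (String × String)) → List (List (String × String)) → PySem.Set String → List (List (String × String))
  | [], selected, _ => selected
  | sec :: rest, selected, seen =>
    let key := pvAnch sec
    if PySem.Set.contains seen key then
      if count ≤ (selected.length : Int) then selected else topLoop count rest selected seen
    else
      let selected' := selected ++ [sec]
      let seen' := PySem.Set.add seen key
      if count ≤ (selected'.length : Int) then selected' else topLoop count rest selected' seen'

def top_sections (sections : List (List (String × String))) (count : Int) : List (List (String × String)) :=
  let usable := sections_with_text sections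
  let ranked := PySem.List.sorted usable (fun item => pvLen item) true
  topLoop count ranked [] PySem.Set.empty

-- ===== PORT B =====
-- body of B's dict-building for loop: best[key] = cand if cur is None or size > cur[0] else cur
def bestStep (d : PySem.Dict String (Int × Int × List (String × String))) (p : Int × List (String × String)) : PySem.Dict String (Int × Int × List (String × String)) :=
  let key := pvAnch p.2
  let size := pvLen p.2
  let cur := d.get? key
  d.insert key (match cur with
    | none => (size, p.1, p.2)
    | some c => if size > c.1 then (size, p.1, p.2) else c)

def top_sections_alt (sections : List (List (String × String))) (count : Int) : List (List (String × String)) :=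
  let usable := sections_with_text sections
  let best := (PySem.List.enumerate usable 0).foldl bestStep PySem.Dict.empty
  let reps := PySem.List.sorted2 best.values (fun item => -item.1) (fun item => item.2.1) false
  ((PySem.List.enumerate reps 0).filter (fun p => decide (p.1 < count))).map (fun p => p.2.2.2)

-- ===== PRECONDITION & SPEC =====
-- Pre_ : every section dict carries the "text" and "anchor" keys; elsewhere Python A raises
-- KeyError.  (Slightly narrower than A's exact domain: A never reads "anchor" off a section
-- whose text is blank while some other section has text, or off sections the early break skips.)
def Pre_top_sections (sections : List (List (String × String))) (count : Int) : Prop :=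
  ∀ sec ∈ sections, "text" ∈ sec.map Prod.fst ∧ "anchor" ∈ sec.map Prod.fst
instance (sections : List (List (String × String))) (count : Int) : Decidable (Pre_top_sections sections count) := by unfold Pre_top_sections; infer_instance

def pvWitness_top_sections : (List (List (String × String))) × Int :=
  ([[("text", "alpha"), ("anchor", "a")], [("text", "longer body"), ("anchor", "b")]], 1)

-- On count ≤ 0 with a nonempty list A still returns one section (its break fires only after the
-- first append); B returns the intended empty selection, as `count` asks for at most that many.
def D_top_sections (sections : List (List (String × String))) (count : Int) : Prop :=
  sections ≠ [] ∧ count ≤ 0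
instance (sections : List (List (String × String))) (count : Int) : Decidable (D_top_sections sections count) := by unfold D_top_sections; infer_instance

def Spec_top_sections (sections : List (List (String × String))) (count : Int) (out : List (List (String × String))) : Prop := ¬ D_top_sections sections count → out = top_sections_alt sections count
instance (sections : List (List (String × String))) (count : Int) (out : List (List (String × String))) : Decidable (Spec_top_sections sections count out) := by unfold Spec_top_sections; infer_instance

def pvDiffWitness_top_sections : (List (List (String × String))) × Int :=
  ([[("text", "a"), ("anchor", "x")]], 0)
def pvDiffWitnessOut_top_sections : (List (List (String × String))) × (List (List (String × String))) :=
  ([[("text", "a"), ("anchor", "x")]], [])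

-- ===== CLAIM (what is proved, stated in full; the proofs are below) =====
def Claim_unchanged_top_sections : Prop := ∀ (sections : List (List (String × String))) (count : Int), Dom_top_sections sections count → Pre_top_sections sections count → Spec_top_sections sections count (top_sections sections count)
def Claim_changed_top_sections : Prop := Dom_top_sections (pvDiffWitness_top_sections.1) (pvDiffWitness_top_sections.2) ∧ Pre_top_sections (pvDiffWitness_top_sections.1) (pvDiffWitness_top_sections.2) ∧ D_top_sections (pvDiffWitness_top_sections.1) (pvDiffWitness_top_sections.2) ∧ top_sections (pvDiffWitness_top_sections.1) (pvDiffWitness_top_sections.2) = pvDiffWitnessOut_top_sections.1 ∧ top_sections_alt (pvDiffWitness_top_sections.1) (pvDiffWitness_top_sections.2) = pvDiffWitnessOut_top_sections.2 ∧ pvDiffWitnessOut_top_sections.1 ≠ pvDiffWitnessOut_top_sections.2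
def Claim_exact_top_sections : Prop := ∀ (sections : List (List (String × String))) (count : Int), Dom_top_sections sections count → Pre_top_sections sections count → D_top_sections sections count → top_sections sections count ≠ top_sections_alt sections count

-- ===== LEMMAS AND PROOFS =====

-- pair p = (original index, section); triple pvTri p = (text length, index, section) as B stores
def pvTri (p : Int × List (String × String)) : Int × Int × List (String × String) := (pvLen p.2, p.1, p.2)

-- the strict ranking order: longer text first, then smaller original index
def pvLex (p q : Int × List (String × String)) : Prop :=
  pvLen q.2 < pvLen p.2 ∨ (pvLen p.2 = pvLen q.2 ∧ p.1 < q.1)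

-- A's stable reverse sort, re-expressed as the (strict) sorted2 over enumerated pairs
def pvSL (usable : List (List (String × String))) : List (Int × List (String × String)) :=
  PySem.List.sorted2 (PySem.List.enumerate usable 0) (fun p => -(pvLen p.2)) (fun p => p.1) false

-- first-per-anchor dedup of a pair list, as A's seen-set walk performs it
def pvDedup : List (Int × List (String × String)) → PySem.Set String → List (Int × List (String × String))
  | [], _ => []
  | p :: rest, seen =>
    if PySem.Set.contains seen (pvAnch p.2) then pvDedup rest seen
    else p :: pvDedup rest (PySem.Set.add seen (pvAnch p.2))

-- what B's dict fold computes at one key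
def pvPick (a : String) (l : List (Int × List (String × String))) : Option (Int × Int × List (String × String)) :=
  l.foldl (fun o p => if pvAnch p.2 = a then some (match o with
    | none => pvTri p
    | some c => if pvLen p.2 > c.1 then pvTri p else c) else o) none

lemma pv_insertBy_map {α β : Type} (bf : α → α → Bool) (bg : β → β → Bool) (f : α → β) (x : α) :
    ∀ (ys : List α), (∀ y ∈ ys, bf x y = bg (f x) (f y)) →
    (PySem.List.insertBy bf x ys).map f = PySem.List.insertBy bg (f x) (ys.map f) := by
  intro ys
  induction ys with
  | nil => intro _; simp [PySem.List.insertBy]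
  | cons y t ih =>
    intro h
    have hy := h y (by simp)
    by_cases hb : bf x y = true
    · simp [PySem.List.insertBy, hb, hy ▸ hb]
    · have hb' : bf x y = false := by simpa using hb
      have hg : bg (f x) (f y) = false := hy ▸ hb'
      simp [PySem.List.insertBy, hb', hg, ih (fun z hz => h z (by simp [hz]))]

lemma pv_fold_bridge :
    ∀ (xs : List (List (String × String))) (s : Int) (acc : List (Int × List (String × String))),
    (∀ p ∈ acc, p.1 < s) →
    ((PySem.List.enumerate xs s).foldl (fun a x => PySem.List.insertBy
        (fun p q => decide (-(pvLen p.2) < -(pvLen q.2)) || (!decide (-(pvLen q.2) < -(pvLen p.2)) && decide (p.1 < q.1))) x a) acc).map (·.2)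
      = xs.foldl (fun a x => PySem.List.insertBy (fun a b => decide (pvLen b < pvLen a)) x a) (acc.map (·.2)) := by
  intro xs
  induction xs with
  | nil => intro s acc h; simp [PySem.List.enumerate]
  | cons x xs ih =>
    intro s acc h
    rw [PySem.List.enumerate_cons]
    simp only [List.foldl_cons]
    have hmap : (PySem.List.insertBy
        (fun p q => decide (-(pvLen p.2) < -(pvLen q.2)) || (!decide (-(pvLen q.2) < -(pvLen p.2)) && decide (p.1 < q.1))) (s, x) acc).map (·.2)
        = PySem.List.insertBy (fun a b => decide (pvLen b < pvLen a)) x (acc.map (·.2)) := by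
      have := pv_insertBy_map
        (fun p q => decide (-(pvLen p.2) < -(pvLen q.2)) || (!decide (-(pvLen q.2) < -(pvLen p.2)) && decide (p.1 < q.1)))
        (fun a b => decide (pvLen b < pvLen a)) (·.2) (s, x) acc ?_
      · exact this
      · intro q hq
        have hlt : q.1 < s := h q hq
        show (decide (-(pvLen x) < -(pvLen q.2)) || (!decide (-(pvLen q.2) < -(pvLen x)) && decide (s < q.1)))
            = decide (pvLen q.2 < pvLen x)
        have h1 : decide (s < q.1) = false := by
          simp only [decide_eq_false_iff_not]; omega
        have h2 : decide (-(pvLen x) < -(pvLen q.2)) = decide (pvLen q.2 < pvLen x) := by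
          rw [decide_eq_decide]; omega
        rw [h1, h2]
        simp
    rw [← hmap]
    refine ih (s + 1) _ ?_
    intro p hp
    rcases (PySem.List.mem_insertBy _ _ p acc).mp hp with heq | hp'
    · subst heq; omega
    · have := h p hp'; omega

lemma pv_sorted_eq_map_SL (usable : List (List (String × String))) :
    PySem.List.sorted usable (fun item => pvLen item) true = (pvSL usable).map (·.2) := by
  have h1 : pvSL usable = (PySem.List.enumerate usable 0).foldl (fun a x => PySem.List.insertBy
      (fun p q => decide (-(pvLen p.2) < -(pvLen q.2)) || (!decide (-(pvLen q.2) < -(pvLen p.2)) && decide (p.1 < q.1))) x a) [] := rfl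
  have h2 : PySem.List.sorted usable (fun item => pvLen item) true
      = usable.foldl (fun a x => PySem.List.insertBy (fun a b => decide (pvLen b < pvLen a)) x a) [] :=
    PySem.List.sorted_rev_eq_foldl_insertBy usable (fun item => pvLen item)
  rw [h1, h2, pv_fold_bridge usable 0 [] (by intro p hp; simp at hp)]
  rfl

lemma pv_bf_iff {α : Type} (k1 k2 : α → Int) (a b : α) :
    ((decide (k1 a < k1 b) || (!decide (k1 b < k1 a) && decide (k2 a < k2 b))) = true)
    ↔ (k1 a < k1 b ∨ (¬ (k1 b < k1 a) ∧ k2 a < k2 b)) := by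
  simp

lemma pv_R_iff {α : Type} (k1 k2 : α → Int) (a b : α) :
    ((decide (k1 b < k1 a) || (!decide (k1 a < k1 b) && decide (k2 b < k2 a))) = false)
    ↔ ¬ (k1 b < k1 a ∨ (¬ (k1 a < k1 b) ∧ k2 b < k2 a)) := by
  rw [← pv_bf_iff k1 k2 b a]
  simp

lemma pv_insertBy_pairwise {α : Type} (k1 k2 : α → Int) (x : α) :
    ∀ ys : List α,
    ys.Pairwise (fun a b => (decide (k1 b < k1 a) || (!decide (k1 a < k1 b) && decide (k2 b < k2 a))) = false) →
    (PySem.List.insertBy (fun a b => decide (k1 a < k1 b) || (!decide (k1 b < k1 a) && decide (k2 a < k2 b))) x ys).Pairwise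
      (fun a b => (decide (k1 b < k1 a) || (!decide (k1 a < k1 b) && decide (k2 b < k2 a))) = false) := by
  intro ys
  induction ys with
  | nil => intro _; simp [PySem.List.insertBy]
  | cons y t ih =>
    intro hpw
    obtain ⟨hy, ht⟩ := List.pairwise_cons.mp hpw
    by_cases hb : (decide (k1 x < k1 y) || (!decide (k1 y < k1 x) && decide (k2 x < k2 y))) = true
    · rw [PySem.List.insertBy, if_pos hb]
      rw [pv_bf_iff] at hb
      refine List.pairwise_cons.mpr ⟨?_, hpw⟩
      intro z hz
      rw [pv_R_iff]
      rcases List.mem_cons.mp hz with heq | hz'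
      · subst heq; omega
      · have hyz := hy z hz'
        rw [pv_R_iff] at hyz
        omega
    · have hb' : (decide (k1 x < k1 y) || (!decide (k1 y < k1 x) && decide (k2 x < k2 y))) = false := by
        simpa using hb
      rw [PySem.List.insertBy, if_neg hb]
      refine List.pairwise_cons.mpr ⟨?_, ih ht⟩
      intro z hz
      rcases (PySem.List.mem_insertBy _ x z t).mp hz with heq | hz'
      · subst heq; exact hb'
      · exact hy z hz' 

lemma pv_foldl_insert_pairwise {α : Type} (k1 k2 : α → Int) :
    ∀ (l acc : List α),
    acc.Pairwise (fun a b => (decide (k1 b < k1 a) || (!decide (k1 a < k1 b) && decide (k2 b < k2 a))) = false) →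
    (l.foldl (fun acc x => PySem.List.insertBy (fun a b => decide (k1 a < k1 b) || (!decide (k1 b < k1 a) && decide (k2 a < k2 b))) x acc) acc).Pairwise
      (fun a b => (decide (k1 b < k1 a) || (!decide (k1 a < k1 b) && decide (k2 b < k2 a))) = false) := by
  intro l
  induction l with
  | nil => intro acc h; simpa using h
  | cons x l ih =>
    intro acc h
    exact ih _ (pv_insertBy_pairwise k1 k2 x acc h)

lemma pv_sorted2_pairwise_lt {α : Type} (k1 k2 : α → Int) (xs : List α)
    (hnd : xs.Pairwise (fun a b => k2 a ≠ k2 b)) :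
    (PySem.List.sorted2 xs k1 k2 false).Pairwise (fun a b => k1 a < k1 b ∨ (k1 a = k1 b ∧ k2 a < k2 b)) := by
  have heq : PySem.List.sorted2 xs k1 k2 false
      = xs.foldl (fun acc x => PySem.List.insertBy (fun a b => decide (k1 a < k1 b) || (!decide (k1 b < k1 a) && decide (k2 a < k2 b))) x acc) [] := rfl
  have hR : (PySem.List.sorted2 xs k1 k2 false).Pairwise
      (fun a b => (decide (k1 b < k1 a) || (!decide (k1 a < k1 b) && decide (k2 b < k2 a))) = false) := by
    rw [heq]; exact pv_foldl_insert_pairwise k1 k2 xs [] (by simp)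
  have hperm := PySem.List.sorted2_perm xs k1 k2 false
  have hne : (PySem.List.sorted2 xs k1 k2 false).Pairwise (fun a b => k2 a ≠ k2 b) := by
    refine (List.Perm.pairwise_iff ?_ hperm).mpr hnd
    intro x y hxy
    exact fun e => hxy e.symm
  refine (hR.and hne).imp ?_
  intro a b hab
  obtain ⟨h1, h2⟩ := hab
  rw [pv_R_iff] at h1
  omega

lemma pv_sorted2_eq {α : Type} (k1 k2 : α → Int) (xs ys : List α)
    (hnd : xs.Pairwise (fun a b => k2 a ≠ k2 b)) (hperm : ys.Perm xs)
    (hpw : ys.Pairwise (fun a b => k1 a < k1 b ∨ (k1 a = k1 b ∧ k2 a < k2 b))) :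
    PySem.List.sorted2 xs k1 k2 false = ys := by
  refine List.Perm.eq_of_pairwise ?_ (pv_sorted2_pairwise_lt k1 k2 xs hnd) hpw
    ((PySem.List.sorted2_perm xs k1 k2 false).trans hperm.symm)
  intro a b _ _ h1 h2
  exfalso
  rcases h1 with h | ⟨e1, h1'⟩ <;> rcases h2 with h' | ⟨e2, h2'⟩ <;> omega

lemma pv_dedup_sublist (L : List (Int × List (String × String))) (seen : PySem.Set String) :
    (pvDedup L seen).Sublist L := by
  induction L generalizing seen with
  | nil => simp [pvDedup]
  | cons p rest ih =>
    by_cases h : PySem.Set.contains seen (pvAnch p.2) = true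
    · simp only [pvDedup, h, if_true]
      exact (ih seen).cons p
    · simp only [pvDedup, h]
      exact (ih _).cons₂ p

lemma pv_contains_mono {x a : String} {s : PySem.Set String}
    (h : PySem.Set.contains s x = true) : PySem.Set.contains (PySem.Set.add s a) x = true := by
  simp only [PySem.Set.contains, PySem.Set.add] at *
  split
  · exact h
  · simp only [List.contains_append, h, Bool.true_or]

lemma pv_contains_add_self (s : PySem.Set String) (a : String) :
    PySem.Set.contains (PySem.Set.add s a) a = true := by
  simp only [PySem.Set.contains, PySem.Set.add]
  split
  · assumption
  · simp

lemma pv_dedup_fresh :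
    ∀ (L : List (Int × List (String × String))) (seen : PySem.Set String),
    ∀ p ∈ pvDedup L seen, PySem.Set.contains seen (pvAnch p.2) = false := by
  intro L
  induction L with
  | nil => intro seen p hp; simp [pvDedup] at hp
  | cons q rest ih =>
    intro seen p hp
    by_cases h : PySem.Set.contains seen (pvAnch q.2) = true
    · rw [pvDedup, if_pos h] at hp
      exact ih seen p hp
    · have h' : PySem.Set.contains seen (pvAnch q.2) = false := by simpa using h
      rw [pvDedup, if_neg h] at hp
      rcases List.mem_cons.mp hp with heq | hp'
      · subst heq; exact h'
      · have hthis := ih _ p hp'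
        by_cases hc : PySem.Set.contains seen (pvAnch p.2) = true
        · have h2 := pv_contains_mono (a := pvAnch q.2) hc
          rw [hthis] at h2
          exact absurd h2 (by simp)
        · simpa using hc

lemma pv_dedup_anchors :
    ∀ (L : List (Int × List (String × String))) (seen : PySem.Set String) (a : String),
    PySem.Set.contains seen a = false →
    ((∃ p ∈ L, pvAnch p.2 = a) ↔ ∃ p ∈ pvDedup L seen, pvAnch p.2 = a) := by
  intro L
  induction L with
  | nil => intro seen a _; simp [pvDedup]
  | cons q rest ih =>
    intro seen a ha
    by_cases h : PySem.Set.contains seen (pvAnch q.2) = true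
    · rw [pvDedup, if_pos h]
      constructor
      · rintro ⟨p, hp, hpa⟩
        rcases List.mem_cons.mp hp with heq | hp'
        · subst heq; rw [hpa] at h; rw [h] at ha; exact absurd ha (by simp)
        · exact (ih seen a ha).mp ⟨p, hp', hpa⟩
      · rintro ⟨p, hp, hpa⟩
        obtain ⟨p', hp', hpa'⟩ := (ih seen a ha).mpr ⟨p, hp, hpa⟩
        exact ⟨p', by simp [hp'], hpa'⟩
    · rw [pvDedup, if_neg h]
      by_cases hq : pvAnch q.2 = a
      · constructor
        · intro _; exact ⟨q, by simp, hq⟩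
        · intro _; exact ⟨q, by simp, hq⟩
      · have ha' : PySem.Set.contains (PySem.Set.add seen (pvAnch q.2)) a = false := by
          by_cases hc : PySem.Set.contains (PySem.Set.add seen (pvAnch q.2)) a = true
          · exfalso
            simp only [PySem.Set.contains, PySem.Set.add] at hc ha
            split at hc
            · rw [hc] at ha; simp at ha
            · simp only [List.contains_append] at hc
              rcases Bool.or_eq_true_iff.mp hc with hc | hc
              · rw [hc] at ha; simp at ha
              · simp only [List.contains_cons] at hc
                have : a = pvAnch q.2 := by simpa using hc
                exact hq this.symm
          · simpa using hc
        constructor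
        · rintro ⟨p, hp, hpa⟩
          rcases List.mem_cons.mp hp with heq | hp'
          · subst heq; exact absurd hpa hq
          · obtain ⟨p', hp', hpa'⟩ := (ih _ a ha').mp ⟨p, hp', hpa⟩
            exact ⟨p', by simp [hp'], hpa'⟩
        · rintro ⟨p, hp, hpa⟩
          rcases List.mem_cons.mp hp with heq | hp'
          · subst heq; exact absurd hpa hq
          · obtain ⟨p', hp', hpa'⟩ := (ih _ a ha').mpr ⟨p, hp', hpa⟩
            exact ⟨p', by simp [hp'], hpa'⟩

lemma pv_dedup_nodup :
    ∀ (L : List (Int × List (String × String))) (seen : PySem.Set String),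
    ((pvDedup L seen).map (fun p => pvAnch p.2)).Nodup := by
  intro L
  induction L with
  | nil => intro seen; simp [pvDedup]
  | cons q rest ih =>
    intro seen
    by_cases h : PySem.Set.contains seen (pvAnch q.2) = true
    · rw [pvDedup, if_pos h]; exact ih seen
    · have h' : PySem.Set.contains seen (pvAnch q.2) = false := by simpa using h
      rw [pvDedup, if_neg h]
      simp only [List.map_cons, List.nodup_cons]
      refine ⟨?_, ih _⟩
      intro hmem
      obtain ⟨p, hp, hpa⟩ := List.mem_map.mp hmem
      have hf := pv_dedup_fresh rest _ p hp
      rw [hpa] at hf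
      rw [pv_contains_add_self] at hf
      exact absurd hf (by simp)

lemma pv_dedup_min :
    ∀ (L : List (Int × List (String × String))) (seen : PySem.Set String),
    L.Pairwise pvLex →
    ∀ p ∈ pvDedup L seen, ∀ q ∈ L, pvAnch q.2 = pvAnch p.2 → p = q ∨ pvLex p q := by
  intro L
  induction L with
  | nil => intro seen _ p hp; simp [pvDedup] at hp
  | cons x rest ih =>
    intro seen hpw p hp q hq hqa
    have hx : ∀ r ∈ rest, pvLex x r := (List.pairwise_cons.mp hpw).1
    have hrest : rest.Pairwise pvLex := (List.pairwise_cons.mp hpw).2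
    by_cases h : PySem.Set.contains seen (pvAnch x.2) = true
    · rw [pvDedup, if_pos h] at hp
      rcases List.mem_cons.mp hq with heq | hq'
      · subst heq
        have hf := pv_dedup_fresh rest seen p hp
        rw [← hqa] at hf; rw [h] at hf; exact absurd hf (by simp)
      · exact ih seen hrest p hp q hq' hqa
    · rw [pvDedup, if_neg h] at hp
      rcases List.mem_cons.mp hp with heq | hp'
      · subst heq
        rcases List.mem_cons.mp hq with heq | hq'
        · exact Or.inl heq.symm
        · exact Or.inr (hx q hq')
      · rcases List.mem_cons.mp hq with heq | hq'
        · subst heq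
          have hf := pv_dedup_fresh rest _ p hp'
          rw [← hqa] at hf
          rw [pv_contains_add_self] at hf
          exact absurd hf (by simp)
        · exact ih _ hrest p hp' q hq' hqa

lemma pv_get?_fold :
    ∀ (l : List (Int × List (String × String))) (d : PySem.Dict String (Int × Int × List (String × String))) (a : String),
    (l.foldl bestStep d).get? a = l.foldl (fun o p => if pvAnch p.2 = a then some (match o with
      | none => pvTri p
      | some c => if pvLen p.2 > c.1 then pvTri p else c) else o) (d.get? a) := by
  intro l
  induction l with
  | nil => intro d a; simp
  | cons p rest ih =>
    intro d a
    simp only [List.foldl_cons]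
    rw [ih]
    congr 1
    show (bestStep d p).get? a = _
    simp only [bestStep]
    rw [PySem.Dict.get?_insert]
    by_cases h : pvAnch p.2 = a
    · subst h
      rw [if_pos rfl, if_pos rfl]
      rcases hd : d.get? (pvAnch p.2) with _ | c <;> simp [pvTri]
    · rw [if_neg (fun heq => h heq.symm), if_neg h]

lemma pv_pick_min (a : String) :
    ∀ (l : List (Int × List (String × String))), l.Pairwise (fun p q => p.1 < q.1) →
    ((∀ p ∈ l, pvAnch p.2 ≠ a) ∧ pvPick a l = none)
    ∨ (∃ p ∈ l, pvAnch p.2 = a ∧ pvPick a l = some (pvTri p) ∧ ∀ q ∈ l, pvAnch q.2 = a → p = q ∨ pvLex p q) := by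
  intro l
  induction l using List.reverseRecOn with
  | nil => intro _; left; exact ⟨by simp, rfl⟩
  | append_singleton l e ih =>
    intro hpw
    have hl : l.Pairwise (fun p q => p.1 < q.1) :=
      List.Pairwise.sublist (List.sublist_append_left l [e]) hpw
    have hcross : ∀ p ∈ l, p.1 < e.1 := by
      have hap := List.pairwise_append.mp hpw
      intro p hp; exact hap.2.2 p hp e (by simp)
    have hstep : pvPick a (l ++ [e]) = (if pvAnch e.2 = a then some (match pvPick a l with
        | none => pvTri e
        | some c => if pvLen e.2 > c.1 then pvTri e else c) else pvPick a l) := by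
      simp [pvPick, List.foldl_append]
    by_cases he : pvAnch e.2 = a
    · rcases ih hl with ⟨hnone, hpick⟩ | ⟨p, hp, hpa, hpick, hmin⟩
      · right
        refine ⟨e, by simp, he, ?_, ?_⟩
        · rw [hstep, if_pos he, hpick]
        · intro q hq hqa
          rcases List.mem_append.mp hq with hq' | hq'
          · exact absurd hqa (hnone q hq')
          · left; simp at hq'; rw [hq']
      · by_cases hgt : pvLen e.2 > (pvTri p).1
        · right
          refine ⟨e, by simp, he, ?_, ?_⟩
          · rw [hstep, if_pos he, hpick]
            simp only [if_pos hgt]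
          · intro q hq hqa
            rcases List.mem_append.mp hq with hq' | hq'
            · right
              simp only [pvTri] at hgt
              rcases hmin q hq' hqa with heq | hlex
              · subst heq
                exact Or.inl (by omega)
              · simp only [pvLex] at hlex ⊢
                omega
            · left; simp at hq'; rw [hq']
        · right
          refine ⟨p, List.mem_append_left _ hp, hpa, ?_, ?_⟩
          · rw [hstep, if_pos he, hpick]
            simp only [if_neg hgt]
          · intro q hq hqa
            rcases List.mem_append.mp hq with hq' | hq'
            · exact hmin q hq' hqa
            · simp only [List.mem_singleton] at hq'
              subst hq'
              right
              simp only [pvTri] at hgt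
              have hpe : p.1 < q.1 := hcross p hp
              simp only [pvLex]
              omega
    · rcases ih hl with ⟨hnone, hpick⟩ | ⟨p, hp, hpa, hpick, hmin⟩
      · left
        refine ⟨?_, by rw [hstep, if_neg he, hpick]⟩
        intro q hq
        rcases List.mem_append.mp hq with hq' | hq'
        · exact hnone q hq'
        · simp only [List.mem_singleton] at hq'; subst hq'; exact he
      · right
        refine ⟨p, List.mem_append_left _ hp, hpa, by rw [hstep, if_neg he, hpick], ?_⟩
        intro q hq hqa
        rcases List.mem_append.mp hq with hq' | hq'
        · exact hmin q hq' hqa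
        · simp only [List.mem_singleton] at hq'; subst hq'; exact absurd hqa he

lemma pv_filter_enumerate_take {α : Type} :
    ∀ (L : List α) (s c : Int),
    ((PySem.List.enumerate L s).filter (fun p => decide (p.1 < c))).map (·.2) = L.take (c - s).toNat := by
  intro L
  induction L with
  | nil => intro s c; simp [PySem.List.enumerate]
  | cons x L ih =>
    intro s c
    rw [PySem.List.enumerate_cons]
    by_cases h : s < c
    · have h1 : (c - s).toNat = (c - (s + 1)).toNat + 1 := by omega
      simp only [List.filter_cons, decide_eq_true_eq, h, if_true, List.map_cons, ih, h1,
        List.take_succ_cons]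
    · have h0 : (c - s).toNat = 0 := by omega
      have h1 : (c - (s + 1)).toNat = 0 := by omega
      simp only [h0, List.take_zero]
      simp only [List.filter_cons, decide_eq_true_eq, h, if_false, ih, h1, List.take_zero]

lemma pv_topLoop :
    ∀ (L : List (Int × List (String × String))) (seen : PySem.Set String) (sel : List (List (String × String))) (count : Int),
    (sel.length : Int) < count →
    topLoop count (L.map (·.2)) sel seen = sel ++ ((pvDedup L seen).take ((count - sel.length).toNat)).map (·.2) := by
  intro L
  induction L with
  | nil => intro seen sel count h; simp [topLoop, pvDedup]
  | cons p rest ih =>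
    intro seen sel count h
    simp only [List.map_cons, topLoop]
    by_cases hs : PySem.Set.contains seen (pvAnch p.2) = true
    · rw [pvDedup, if_pos hs]
      have hlt : ¬ (count ≤ (sel.length : Int)) := by omega
      simp only [hs, if_true, if_neg hlt]
      exact ih seen sel count h
    · rw [pvDedup, if_neg hs]
      simp only [hs, Bool.false_eq_true, if_false]
      by_cases hbreak : count ≤ ((sel ++ [p.2]).length : Int)
      · rw [if_pos hbreak]
        have hlen : ((sel ++ [p.2]).length : Int) = (sel.length : Int) + 1 := by
          simp
        have h1 : (count - (sel.length : Int)).toNat = 1 := by omega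
        rw [h1, List.take_succ_cons, List.take_zero]
        simp
      · rw [if_neg hbreak]
        have hlen : ((sel ++ [p.2]).length : Int) = (sel.length : Int) + 1 := by simp
        have h' : (((sel ++ [p.2]).length : Nat) : Int) < count := by omega
        rw [ih _ _ _ h']
        have h2 : (count - (sel.length : Int)).toNat = ((count - ((sel ++ [p.2]).length : Int)).toNat) + 1 := by
          rw [hlen] at *; omega
        rw [h2, List.take_succ_cons]
        simp

lemma pv_core (usable : List (List (String × String))) (count : Int) (h : 1 ≤ count) :
    topLoop count (PySem.List.sorted usable (fun item => pvLen item) true) [] PySem.Set.empty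
      = ((PySem.List.enumerate (PySem.List.sorted2 (((PySem.List.enumerate usable 0).foldl bestStep PySem.Dict.empty).values)
            (fun item => -item.1) (fun item => item.2.1) false) 0).filter (fun p => decide (p.1 < count))).map (fun p => p.2.2.2) := by
  have heupw : (PySem.List.enumerate usable 0).Pairwise (fun p q => p.1 < q.1) :=
    PySem.List.pairwise_lt_enumerate usable 0
  have hperm : (pvSL usable).Perm (PySem.List.enumerate usable 0) :=
    PySem.List.sorted2_perm _ _ _ _
  have heune : (PySem.List.enumerate usable 0).Pairwise (fun p q => p.1 ≠ q.1) :=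
    heupw.imp (by intro p q hpq; omega)
  have hSLlex : (pvSL usable).Pairwise pvLex := by
    have := pv_sorted2_pairwise_lt (fun p => -(pvLen p.2)) (fun p : Int × List (String × String) => p.1)
      (PySem.List.enumerate usable 0) heune
    refine this.imp ?_
    intro p q hpq; dsimp only at hpq; simp only [pvLex]; omega
  have hDdplex : (pvDedup (pvSL usable) PySem.Set.empty).Pairwise pvLex :=
    List.Pairwise.sublist (pv_dedup_sublist (pvSL usable) _) hSLlex
  -- A side
  have hA : topLoop count (PySem.List.sorted usable (fun item => pvLen item) true) [] PySem.Set.empty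
      = ((pvDedup (pvSL usable) PySem.Set.empty).take (count.toNat)).map (·.2) := by
    rw [pv_sorted_eq_map_SL usable]
    have := pv_topLoop (pvSL usable) PySem.Set.empty [] count (by simpa using h)
    simpa using this
  -- dict facts
  have hbest_get : ∀ a, (((PySem.List.enumerate usable 0).foldl bestStep PySem.Dict.empty).get? a) = pvPick a (PySem.List.enumerate usable 0) := by
    intro a
    rw [pv_get?_fold (PySem.List.enumerate usable 0) PySem.Dict.empty a, PySem.Dict.get?_empty]
    rfl
  have hkeys : ((PySem.List.enumerate usable 0).foldl bestStep PySem.Dict.empty).keys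
      = PySem.Set.ofList ((PySem.List.enumerate usable 0).map (fun p => pvAnch p.2)) := by
    have hk := PySem.Dict.keys_foldl_insert_key (κ := String) (ν := Int × Int × List (String × String))
      (PySem.List.enumerate usable 0) (fun p => pvAnch p.2)
      (fun d p => match d.get? (pvAnch p.2) with
        | none => (pvLen p.2, p.1, p.2)
        | some c => if pvLen p.2 > c.1 then (pvLen p.2, p.1, p.2) else c) PySem.Dict.empty
    rw [show ((PySem.List.enumerate usable 0).foldl bestStep PySem.Dict.empty)
        = ((PySem.List.enumerate usable 0).foldl (fun d p => d.insert (pvAnch p.2) (match d.get? (pvAnch p.2) with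
          | none => (pvLen p.2, p.1, p.2)
          | some c => if pvLen p.2 > c.1 then (pvLen p.2, p.1, p.2) else c)) PySem.Dict.empty) from rfl]
    rw [hk, PySem.Dict.keys_empty]
    rfl
  have hknd : ((PySem.List.enumerate usable 0).foldl bestStep PySem.Dict.empty).keys.Nodup := by
    rw [hkeys]
    exact PySem.Set.nodup_ofList _
  have hvals : ((PySem.List.enumerate usable 0).foldl bestStep PySem.Dict.empty).values
      = ((PySem.List.enumerate usable 0).foldl bestStep PySem.Dict.empty).keys.map
          (fun k => ((PySem.List.enumerate usable 0).foldl bestStep PySem.Dict.empty).getD k (0, 0, [])) :=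
    PySem.Dict.values_eq_map_keys _ hknd _
  -- representative agreement
  have hrep : ∀ p ∈ pvDedup (pvSL usable) PySem.Set.empty,
      ((PySem.List.enumerate usable 0).foldl bestStep PySem.Dict.empty).getD (pvAnch p.2) (0,0,[]) = pvTri p := by
    intro p hp
    have hpSL : p ∈ pvSL usable := (pv_dedup_sublist (pvSL usable) _).subset hp
    have hpeu : p ∈ PySem.List.enumerate usable 0 := hperm.subset hpSL
    rcases pv_pick_min (pvAnch p.2) (PySem.List.enumerate usable 0) heupw with ⟨hnone, _⟩ | ⟨q, hq, hqa, hpick, hmin⟩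
    · exact absurd rfl (hnone p hpeu)
    · have hqSL : q ∈ pvSL usable := hperm.mem_iff.mpr hq
      have h1 := hmin p hpeu rfl
      have h2 := pv_dedup_min (pvSL usable) _ hSLlex p hp q hqSL hqa
      have hpq : p = q := by
        rcases h1 with h1 | h1
        · exact h1.symm
        · rcases h2 with h2 | h2
          · exact h2
          · exfalso; simp only [pvLex] at h1 h2; omega
      subst hpq
      rw [PySem.Dict.getD_eq_get?_getD, hbest_get, hpick]
      rfl
  -- the anchors of the dict and of the dedup walk agree as nodup lists
  have hancperm : (PySem.Set.ofList ((PySem.List.enumerate usable 0).map (fun p => pvAnch p.2))).Perm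
      ((pvDedup (pvSL usable) PySem.Set.empty).map (fun p => pvAnch p.2)) := by
    rw [List.perm_ext_iff_of_nodup (PySem.Set.nodup_ofList _) (pv_dedup_nodup (pvSL usable) _)]
    intro a
    rw [PySem.Set.mem_ofList]
    constructor
    · intro ha
      obtain ⟨p, hp, hpa⟩ := List.mem_map.mp ha
      have hex : ∃ p ∈ pvSL usable, pvAnch p.2 = a := ⟨p, hperm.mem_iff.mpr hp, hpa⟩
      obtain ⟨p', hp', hpa'⟩ := (pv_dedup_anchors (pvSL usable) PySem.Set.empty a rfl).mp hex
      exact List.mem_map.mpr ⟨p', hp', hpa'⟩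
    · intro ha
      obtain ⟨p, hp, hpa⟩ := List.mem_map.mp ha
      have hpSL := (pv_dedup_sublist (pvSL usable) _).subset hp
      exact List.mem_map.mpr ⟨p, hperm.mem_iff.mp hpSL, hpa⟩
  -- values ~ dedup triples
  have hvperm : (((PySem.List.enumerate usable 0).foldl bestStep PySem.Dict.empty).values).Perm
      ((pvDedup (pvSL usable) PySem.Set.empty).map pvTri) := by
    rw [hvals, hkeys]
    have hmapDdp : (pvDedup (pvSL usable) PySem.Set.empty).map pvTri
        = ((pvDedup (pvSL usable) PySem.Set.empty).map (fun p => pvAnch p.2)).map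
            (fun k => ((PySem.List.enumerate usable 0).foldl bestStep PySem.Dict.empty).getD k (0,0,[])) := by
      rw [List.map_map]
      apply List.map_congr_left
      intro p hp
      exact (hrep p hp).symm
    rw [hmapDdp]
    exact hancperm.map _
  -- distinct secondary keys on the values
  have hvk2 : (((PySem.List.enumerate usable 0).foldl bestStep PySem.Dict.empty).values).Pairwise
      (fun a b => a.2.1 ≠ b.2.1) := by
    have heund : ((PySem.List.enumerate usable 0).map (fun p => p.1)).Nodup :=
      (List.pairwise_map).mpr heune
    have hSLnd : ((pvSL usable).map (fun p => p.1)).Nodup :=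
      ((hperm.map (fun p => p.1)).nodup_iff).mpr heund
    have hDnd : (((pvDedup (pvSL usable) PySem.Set.empty).map (fun p => p.1))).Nodup :=
      ((pv_dedup_sublist (pvSL usable) _).map (fun p => p.1)).nodup hSLnd
    have h1 : (((pvDedup (pvSL usable) PySem.Set.empty).map pvTri).map (fun t => t.2.1)).Nodup := by
      rw [List.map_map]
      exact hDnd
    have h2 : ((((PySem.List.enumerate usable 0).foldl bestStep PySem.Dict.empty).values).map (fun t => t.2.1)).Nodup :=
      ((hvperm.map (fun t => t.2.1)).nodup_iff).mpr h1
    exact (List.pairwise_map).mp h2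
  -- B's sort returns exactly the dedup triples
  have hreps : PySem.List.sorted2 (((PySem.List.enumerate usable 0).foldl bestStep PySem.Dict.empty).values)
      (fun item => -item.1) (fun item => item.2.1) false
      = (pvDedup (pvSL usable) PySem.Set.empty).map pvTri := by
    apply pv_sorted2_eq _ _ _ _ hvk2 hvperm.symm
    refine (List.pairwise_map).mpr (hDdplex.imp ?_)
    intro p q hpq
    simp only [pvLex] at hpq
    simp only [pvTri]
    omega
  -- assemble
  rw [hA, hreps]
  have hfil := pv_filter_enumerate_take ((pvDedup (pvSL usable) PySem.Set.empty).map pvTri) 0 count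
  have hmm : ((PySem.List.enumerate ((pvDedup (pvSL usable) PySem.Set.empty).map pvTri) 0).filter
        (fun p => decide (p.1 < count))).map (fun p => p.2.2.2)
      = (((PySem.List.enumerate ((pvDedup (pvSL usable) PySem.Set.empty).map pvTri) 0).filter
        (fun p => decide (p.1 < count))).map (·.2)).map (fun t => t.2.2) := by
    rw [List.map_map]
    rfl
  rw [hmm, hfil]
  rw [show count - 0 = count from by omega]
  rw [← List.map_take, List.map_map]
  rfl

lemma pv_main (sections : List (List (String × String))) (count : Int) (h : 1 ≤ count) :
    top_sections sections count = top_sections_alt sections count := by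
  simpa only [top_sections, top_sections_alt] using pv_core (sections_with_text sections) count h

-- ===== VERDICT (by name: the statement is the Claim_ definition above) =====
theorem top_sections_spec : Claim_unchanged_top_sections := by
  intro sections count _ _ hnd
  by_cases h1 : 1 ≤ count
  · exact pv_main sections count h1
  · have hsec : sections = [] := by
      by_contra hne
      exact hnd ⟨hne, by omega⟩
    subst hsec
    rfl

theorem top_sections_changed : Claim_changed_top_sections := by
  unfold Claim_changed_top_sections; decide

theorem top_sections_tight : Claim_exact_top_sections := by
  intro sections count _ _ hd
  obtain ⟨hne, hle⟩ := hd
  have hB : top_sections_alt sections count = [] := by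
    simp only [top_sections_alt]
    have hmm : ∀ (L : List (Int × (Int × Int × List (String × String)))),
        L.map (fun p => p.2.2.2) = (L.map (·.2)).map (fun t => t.2.2) := by
      intro L; rw [List.map_map]; rfl
    rw [hmm, pv_filter_enumerate_take]
    have h0 : (count - 0).toNat = 0 := by omega
    rw [h0]
    simp
  have husable : sections_with_text sections ≠ [] := by
    simp only [sections_with_text]
    split
    · exact hne
    · assumption
  have hrank : PySem.List.sorted (sections_with_text sections) (fun item => pvLen item) true ≠ [] := by
    intro hnil
    exact husable (by rwa [PySem.List.sorted_eq_nil_iff] at hnil)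
  obtain ⟨r, rs, hr⟩ := List.exists_cons_of_ne_nil hrank
  have hA : top_sections sections count = [r] := by
    simp only [top_sections]
    rw [hr]
    rw [show topLoop count (r :: rs) [] PySem.Set.empty
        = (if PySem.Set.contains PySem.Set.empty (pvAnch r) then
            (if count ≤ ((([] : List (List (String × String))).length : Int)) then [] else topLoop count rs [] PySem.Set.empty)
          else (if count ≤ ((([] ++ [r] : List (List (String × String))).length : Int)) then [] ++ [r]
            else topLoop count rs ([] ++ [r]) (PySem.Set.add PySem.Set.empty (pvAnch r)))) from rfl]
    rw [if_neg (by simp [PySem.Set.contains, PySem.Set.empty])]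
    rw [if_pos (by simp; omega)]
    simp
  rw [hA, hB]
  simp
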